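-- pv_equiv track=rewrite | github.com/orochi235/norinori | tools/grid-to-regions.py | grid_to_regions
-- ===== SOURCE A (Python) =====
-- def grid_to_regions(text: str) -> str:
--     rows = [r.rstrip() for r in text.splitlines() if r.strip()]
--     groups: dict[str, list[tuple[int, int]]] = {}
--     for y, row in enumerate(rows, start=1):
--         for x, ch in enumerate(row, start=1):
--             if ch in ('.', ' '):
--                 continue
--             groups.setdefault(ch, []).append((x, y))
--     return ' | '.join(
--         ' '.join(f'{x},{y}' for x, y in groups[k])
--         for k in sorted(groups)
--     )
-- ===== SOURCE B (Python) =====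
-- def grid_to_regions(text: str) -> str:
--     cells = [(ch, (x, y))
--              for y, row in enumerate([r.rstrip() for r in text.splitlines() if r.strip()], start=1)
--              for x, ch in enumerate(row, start=1)
--              if ch not in ('.', ' ')]
--     return ' | '.join(
--         ' '.join(f'{x},{y}' for c2, (x, y) in cells if c2 == ch)
--         for ch in sorted({c for c, _ in cells})
--     )
-- ===== Notes on version B (the rewrite author's own statement) =====
-- stated objective: alternative
-- what changed: Replaces A's incrementally built dict-of-lists keyed by character with a single flat list of (char, (x, y)) cells built in one comprehension; the distinct characters are collected as a set, sorted, and each region is produced by a filter pass over the flat list, so the dict disappears entirely.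
import Mathlib
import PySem

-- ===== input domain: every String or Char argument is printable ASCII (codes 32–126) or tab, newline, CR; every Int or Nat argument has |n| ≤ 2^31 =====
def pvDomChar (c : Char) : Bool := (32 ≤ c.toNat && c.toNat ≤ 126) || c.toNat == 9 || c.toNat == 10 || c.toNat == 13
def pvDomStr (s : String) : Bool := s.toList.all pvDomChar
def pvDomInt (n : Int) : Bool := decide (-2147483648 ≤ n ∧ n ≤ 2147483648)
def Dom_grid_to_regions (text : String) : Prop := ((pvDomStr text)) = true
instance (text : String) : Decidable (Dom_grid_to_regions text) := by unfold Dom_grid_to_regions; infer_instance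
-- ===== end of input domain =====

-- B replaces A's incremental dict-of-lists with a flat (char, cell) list scanned per sorted distinct char; objective: alternative decomposition (no dict).

-- ===== PORT A =====
-- literal port of A: nested enumerate loops building a dict of lists via setdefault/append
-- (setdefault(ch, []).append(p) = modify ch [] (· ++ [p])); groups[k] with k ∈ keys never
-- raises, ported exactly as getD k [].
def grid_to_regions (text : String) : String :=
  let rows := ((PySem.Str.splitlines text).filter (fun r => PySem.Str.strip r != "")).map PySem.Str.rstrip
  let groups :=
    (PySem.List.enumerate rows 1).foldl (fun d p =>
      (PySem.List.enumerate p.2.toList 1).foldl (fun d q =>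
        if q.2 == '.' || q.2 == ' ' then d
        else d.modify q.2 [] (· ++ [(q.1, p.1)])) d)
      (PySem.Dict.empty (κ := Char) (ν := List (Int × Int)))
  PySem.Str.join " | "
    ((PySem.List.sorted groups.keys (fun k => k) false).map (fun k =>
      PySem.Str.join " " ((groups.getD k []).map (fun xy =>
        PySem.Int.toStr xy.1 ++ "," ++ PySem.Int.toStr xy.2))))

-- ===== PORT B =====
-- port of Source B: one flat comprehension of (ch, (x, y)) triples, then for each sorted
-- distinct char a filter pass over the flat list.
def grid_to_regions_alt (text : String) : String :=
  let cells : List (Char × Int × Int) :=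
    (PySem.List.enumerate (((PySem.Str.splitlines text).filter (fun r => PySem.Str.strip r != "")).map PySem.Str.rstrip) 1).flatMap
      (fun p => ((PySem.List.enumerate p.2.toList 1).filter (fun q => !(q.2 == '.' || q.2 == ' '))).map
        (fun q => (q.2, q.1, p.1)))
  PySem.Str.join " | "
    ((PySem.List.sorted (PySem.Set.ofList (cells.map (·.1))) (fun c => c) false).map (fun ch =>
      PySem.Str.join " " ((cells.filter (fun t => t.1 == ch)).map (fun t =>
        PySem.Int.toStr t.2.1 ++ "," ++ PySem.Int.toStr t.2.2))))

-- ===== PRECONDITION & SPEC =====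
def Spec_grid_to_regions (text : String) (out : String) : Prop := out = grid_to_regions_alt text
instance (text : String) (out : String) : Decidable (Spec_grid_to_regions text out) := by unfold Spec_grid_to_regions; infer_instance

-- ===== CLAIM (what is proved, stated in full; the proofs are below) =====
def Claim_equal_grid_to_regions : Prop := ∀ (text : String), Dom_grid_to_regions text → Spec_grid_to_regions text (grid_to_regions text)

-- ===== LEMMAS AND PROOFS =====

theorem pv_foldl_flatMap {α β γ : Type} (g : α → List β) (f : γ → β → γ) (l : List α) (init : γ) :
    (l.flatMap g).foldl f init = l.foldl (fun acc x => (g x).foldl f acc) init := by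
  induction l generalizing init with
  | nil => rfl
  | cons a t ih => simp [List.flatMap_cons, List.foldl_append, ih]

theorem pv_inner_eq (y : Int) (cs : List (Int × Char)) (d : PySem.Dict Char (List (Int × Int))) :
    cs.foldl (fun d q =>
        if q.2 == '.' || q.2 == ' ' then d
        else d.modify q.2 [] (· ++ [(q.1, y)])) d
    = ((cs.filter (fun q => !(q.2 == '.' || q.2 == ' '))).map
        (fun q => ((q.2 : Char), ((q.1 : Int), y)))).foldl
        (fun d t => d.modify t.1 [] (· ++ [t.2])) d := by
  induction cs generalizing d with
  | nil => rfl
  | cons c t ih =>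
    rw [List.foldl_cons, List.filter_cons]
    cases hb : (c.2 == '.' || c.2 == ' ') with
    | true =>
      rw [if_pos rfl, if_neg (by decide)]
      exact ih d
    | false =>
      rw [if_neg (by decide), if_pos (by decide), List.map_cons, List.foldl_cons]
      exact ih _

-- A's dict loop over the rows equals the modify-fold over the flat cell list of B.
theorem pv_dict_eq (rows : List String) :
    (PySem.List.enumerate rows 1).foldl (fun d p =>
        (PySem.List.enumerate p.2.toList 1).foldl (fun d q =>
          if q.2 == '.' || q.2 == ' ' then d
          else d.modify q.2 [] (· ++ [(q.1, p.1)])) d)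
      (PySem.Dict.empty (κ := Char) (ν := List (Int × Int)))
    = ((PySem.List.enumerate rows 1).flatMap
        (fun p => ((PySem.List.enumerate p.2.toList 1).filter (fun q => !(q.2 == '.' || q.2 == ' '))).map
          (fun q => ((q.2 : Char), ((q.1 : Int), (p.1 : Int)))))).foldl
        (fun d t => d.modify t.1 [] (· ++ [t.2])) PySem.Dict.empty := by
  rw [pv_foldl_flatMap]
  apply PySem.List.foldl_congr_mem
  intro acc p _
  exact pv_inner_eq p.1 (PySem.List.enumerate p.2.toList 1) acc

-- ===== VERDICT (by name: the statement is the Claim_ definition above) =====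
set_option maxHeartbeats 1000000 in
theorem grid_to_regions_spec : Claim_equal_grid_to_regions := by
  intro text _
  unfold Spec_grid_to_regions grid_to_regions grid_to_regions_alt
  dsimp only
  rw [pv_dict_eq]
  rw [PySem.Dict.keys_foldl_modify_key]
  simp only [PySem.Dict.keys_empty, PySem.Set.update, PySem.Set.ofList_eq_foldl,
             PySem.Dict.getD_foldl_modify_append, PySem.Dict.getD_empty]
  simp only [List.nil_append, List.map_map]
  rfl
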